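-- pv_equiv track=rewrite | github.com/sbp/mmm | trees.py | trees
-- ===== SOURCE A (Python) =====
-- def trees(high, low):
--     if high >= low:
--         for i in range(low, high + 1):
--             for left in trees(i - 1, low):
--                 for right in trees(high, i + 1):
--                     yield left + right + "D"
--     else:
--         yield "."
-- ===== SOURCE B (Python) =====
-- def trees(high, low):
--     # The strings depend only on the range size n = high - low + 1, so build
--     # the answer bottom-up by size (dynamic programming), never regenerating
--     # a subtree list: level[k] holds all tree strings for a range of size k.
--     n = high - low + 1
--     result = ["."]
--     table = [result]
--     for _ in range(1, n + 1):
--         result = [l + r + "D"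
--                   for lev, rev in zip(table, reversed(table))
--                   for l in lev
--                   for r in rev]
--         table.append(result)
--     return result
-- ===== Notes on version B (the rewrite author's own statement) =====
-- stated objective: alternative
-- what changed: The tree-shape strings depend only on the range size, so B replaces A's recursive generator (which regenerates every subtree list for each split point) by a bottom-up dynamic program over sizes: each level is computed once and levels are combined by zipping the table with its reverse.
import Mathlib
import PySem

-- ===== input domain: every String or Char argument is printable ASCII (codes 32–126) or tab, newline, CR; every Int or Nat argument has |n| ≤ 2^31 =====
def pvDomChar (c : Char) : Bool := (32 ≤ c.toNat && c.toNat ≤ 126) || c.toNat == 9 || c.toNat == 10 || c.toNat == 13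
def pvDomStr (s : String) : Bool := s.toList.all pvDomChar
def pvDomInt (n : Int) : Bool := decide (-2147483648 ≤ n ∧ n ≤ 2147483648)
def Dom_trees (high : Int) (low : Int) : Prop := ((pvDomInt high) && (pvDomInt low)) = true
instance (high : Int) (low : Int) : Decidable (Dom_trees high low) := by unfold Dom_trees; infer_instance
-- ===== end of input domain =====

-- B replaces A's recursive generator by a bottom-up dynamic program over range sizes
-- (each level of tree strings is computed once, since the strings depend only on the size).
-- A is a Python generator; equivalence is about the materialised list of yielded strings.

-- ===== PORT A =====
def trees (high : Int) (low : Int) : List String :=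
  if high ≥ low then
    (PySem.List.pyRange low (high + 1) 1).attach.foldl
      (fun acc i =>
        acc ++ (trees (i.1 - 1) low).flatMap (fun left =>
          (trees high (i.1 + 1)).map (fun right => left ++ right ++ "D")))
      []
  else ["."]
termination_by (high - low + 1).toNat
decreasing_by
  · have := (PySem.List.mem_pyRange_one.mp i.2); omega
  · have := (PySem.List.mem_pyRange_one.mp i.2); omega

-- ===== PORT B =====
def trees_alt (high : Int) (low : Int) : List String :=
  ((PySem.List.pyRange 1 (high - low + 1 + 1) 1).foldl
    (fun (st : List String × List (List String)) _ =>
      let result := (st.2.zip st.2.reverse).flatMap (fun p =>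
        p.1.flatMap (fun l => p.2.map (fun r => l ++ r ++ "D")))
      (result, st.2 ++ [result]))
    (["."], [["."]])).1

-- ===== PRECONDITION & SPEC =====
-- Pre_ excludes exactly the inputs on which Python A RAISES: its recursion depth equals the
-- range size high-low+1 plus a small constant, so with Python's default recursion limit (1000)
-- A raises RecursionError before its first yield precisely when high - low ≥ 997 (measured
-- boundary: high-low+1 = 997 returns, 998 raises). Every input on which A returns is admitted.
def Pre_trees (high : Int) (low : Int) : Prop := high - low < 997
instance (high : Int) (low : Int) : Decidable (Pre_trees high low) := by unfold Pre_trees; infer_instance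
def pvWitness_trees : Int × Int := (3, 1)
def Spec_trees (high : Int) (low : Int) (out : List String) : Prop := out = trees_alt high low
instance (high : Int) (low : Int) (out : List String) : Decidable (Spec_trees high low out) := by unfold Spec_trees; infer_instance

-- ===== CLAIM (what is proved, stated in full; the proofs are below) =====
def Claim_equal_trees : Prop := ∀ (high : Int) (low : Int), Dom_trees high low → Pre_trees high low → Spec_trees high low (trees high low)

-- ===== LEMMAS AND PROOFS =====

-- tree strings for a range of size n (proof-side characterisation)
def catT : Nat → List String
  | 0 => ["."]
  | n + 1 => (List.range (n + 1)).attach.flatMap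
      (fun k => (catT k.1).flatMap (fun l => (catT (n - k.1)).map (fun r => l ++ r ++ "D")))
termination_by n => n
decreasing_by
  all_goals (have := List.mem_range.mp k.2; omega)

theorem flatMap_congr_mem {α β : Type} (l : List α) (f g : α → List β)
    (h : ∀ x ∈ l, f x = g x) : l.flatMap f = l.flatMap g := by
  induction l with
  | nil => rfl
  | cons a t ih =>
      simp only [List.flatMap_cons, h a (by simp),
        ih (fun x hx => h x (by simp [hx]))]

theorem attach_flatMap {α β : Type} (l : List α) (f : α → List β) :
    l.attach.flatMap (fun x => f x.1) = l.flatMap f := by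
  rw [List.flatMap, List.flatMap, ← List.attach_map_subtype_val l, List.map_map]
  simp

theorem attach_foldl_append {α β : Type} (l : List α) (f : α → List β) (acc : List β) :
    l.attach.foldl (fun acc x => acc ++ f x.1) acc = acc ++ l.flatMap f := by
  rw [PySem.List.foldl_append_eq_flatMap, attach_flatMap]

-- A computes catT of the range size
theorem trees_eq_catT : ∀ n (high low : Int), (high - low + 1).toNat = n →
    trees high low = catT n := by
  intro n
  induction n using Nat.strong_induction_on with
  | _ n ih =>
    intro high low hn
    rw [trees]
    by_cases h : high ≥ low
    · have hn1 : 1 ≤ n := by omega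
      obtain ⟨m, rfl⟩ : ∃ m, n = m + 1 := ⟨n - 1, by omega⟩
      rw [if_pos h,
        attach_foldl_append (PySem.List.pyRange low (high + 1) 1)
          (fun i => (trees (i - 1) low).flatMap (fun left =>
            (trees high (i + 1)).map (fun right => left ++ right ++ "D"))),
        List.nil_append, PySem.List.pyRange_one, List.flatMap_map]
      have hlen : (high + 1 - low).toNat = m + 1 := by omega
      rw [hlen, catT,
        attach_flatMap (List.range (m + 1))
          (fun k => (catT k).flatMap (fun l => (catT (m - k)).map
            (fun r => l ++ r ++ "D")))]
      apply flatMap_congr_mem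
      intro k hk
      have hk' : k < m + 1 := List.mem_range.mp hk
      rw [ih k (by omega) (low + ↑k - 1) low (by omega),
        ih (m - k) (by omega) high (low + ↑k + 1) (by omega)]
    · have : n = 0 := by omega
      simp [h, this, catT]

theorem foldl_ignore {α β : Type} (f : β → β) :
    ∀ (l : List α) (init : β), l.foldl (fun s _ => f s) init = f^[l.length] init := by
  intro l
  induction l with
  | nil => intro init; rfl
  | cons a t ih => intro init; simp [List.foldl_cons, ih, Function.iterate_succ_apply]

def stepB (st : List String × List (List String)) : List String × List (List String) :=
  let result := (st.2.zip st.2.reverse).flatMap (fun p =>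
    p.1.flatMap (fun l => p.2.map (fun r => l ++ r ++ "D")))
  (result, st.2 ++ [result])

theorem range_reverse_map (n : Nat) :
    (List.range n).reverse = (List.range n).map (fun k => n - 1 - k) := by
  rw [List.range_eq_range', List.reverse_range']
  simp [← List.range_eq_range']

theorem stepB_iterate : ∀ L : Nat,
    stepB^[L] (["."], [["."]]) = (catT L, (List.range (L + 1)).map catT) := by
  intro L
  induction L with
  | zero => simp [catT, List.range_succ]
  | succ m ih =>
      rw [Function.iterate_succ_apply', ih, stepB]
      have hzip : (((List.range (m + 1)).map catT).zip ((List.range (m + 1)).map catT).reverse)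
          = (List.range (m + 1)).map (fun k => (catT k, catT (m - k))) := by
        rw [← List.map_reverse, range_reverse_map (m + 1), List.map_map,
          List.zip_map']
        apply List.map_congr_left
        intro a ha
        have := List.mem_range.mp ha
        simp
      have hres : (((List.range (m + 1)).map catT).zip
            ((List.range (m + 1)).map catT).reverse).flatMap (fun p =>
              p.1.flatMap (fun l => p.2.map (fun r => l ++ r ++ "D")))
          = catT (m + 1) := by
        rw [hzip, List.flatMap_map, catT,
          attach_flatMap (List.range (m + 1))
            (fun k => (catT k).flatMap (fun l => (catT (m - k)).map
              (fun r => l ++ r ++ "D")))]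
      simp only [hres]
      refine congrArg₂ Prod.mk rfl ?_
      rw [List.range_succ (n := m + 1), List.map_append]
      rfl

theorem trees_alt_eq_catT (high low : Int) :
    trees_alt high low = catT (high - low + 1).toNat := by
  rw [trees_alt]
  have hfold : (PySem.List.pyRange 1 (high - low + 1 + 1) 1).foldl
      (fun (st : List String × List (List String)) _ => stepB st) (["."], [["."]])
      = stepB^[(PySem.List.pyRange 1 (high - low + 1 + 1) 1).length] (["."], [["."]]) :=
    foldl_ignore stepB _ _
  show ((PySem.List.pyRange 1 (high - low + 1 + 1) 1).foldl
      (fun (st : List String × List (List String)) _ => stepB st) (["."], [["."]])).1 = _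
  rw [hfold, PySem.List.length_pyRange_one, stepB_iterate]
  have h2 : (high - low + 1 + 1 - 1).toNat = (high - low + 1).toNat := by omega
  rw [h2]

-- ===== VERDICT (by name: the statement is the Claim_ definition above) =====
theorem trees_spec : Claim_equal_trees := by
  intro high low _ _
  unfold Spec_trees
  rw [trees_alt_eq_catT, trees_eq_catT (high - low + 1).toNat high low rfl]
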